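-- pv_equiv track=rewrite | github.com/andrewjleung/gtci | src/06-cyclic-sort/ch03_find_first_k_missing_pos.py | find_k_missing_pos
-- ===== SOURCE A (Python) =====
-- def find_k_missing_pos(nums, k):
--     """
--     Time Complexity:  O(n + k)
--     Space Complexity: O(k)
--     """
--     i = 0
--     # Numbers that are greater or equal to the length of the array which appear within the array.
--     # These need to be accumulated so they can later be ignored when building up the array of
--     # missing positives.
--     greater_positives = set()
--
--     while i < len(nums):
--         j = nums[i] - 1
--
--         if nums[i] > len(nums):
--             greater_positives.add(nums[i])
--             i += 1
--             continue
--
--         if nums[i] < 1 or nums[i] == nums[j]: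
--             i += 1
--             continue
--
--         nums[i], nums[j] = nums[j], nums[i]
--
--     results = []
--     i = 0
--
--     while len(results) < k:
--         # Ignore numbers within the array which are in the right place.
--         if i < len(nums) and nums[i] - 1 == i:
--             i += 1
--             continue
--
--         # Add missing numbers which aren't within the array at the wrong position.
--         if i + 1 not in greater_positives:
--             results.append(i + 1)
--         i += 1
--
--     return results
-- ===== SOURCE B (Python) =====
-- def find_k_missing_pos(nums, k):
--     # One-pass set of the input, then walk candidates 1,2,3,... collecting the
--     # first k positives that are absent. (Unlike A, this does not mutate nums.)
--     present = set(nums)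
--     results = []
--     i = 1
--     while len(results) < k:
--         if i not in present:
--             results.append(i)
--         i += 1
--     return results
-- ===== Notes on version B (the rewrite author's own statement) =====
-- stated objective: simpler
-- what changed: Replaces the in-place cyclic sort plus greater_positives bookkeeping with a single hash set of the input and a straight scan of candidates 1,2,3,... appending those absent; B does not mutate nums (return values agree).
import Mathlib
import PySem

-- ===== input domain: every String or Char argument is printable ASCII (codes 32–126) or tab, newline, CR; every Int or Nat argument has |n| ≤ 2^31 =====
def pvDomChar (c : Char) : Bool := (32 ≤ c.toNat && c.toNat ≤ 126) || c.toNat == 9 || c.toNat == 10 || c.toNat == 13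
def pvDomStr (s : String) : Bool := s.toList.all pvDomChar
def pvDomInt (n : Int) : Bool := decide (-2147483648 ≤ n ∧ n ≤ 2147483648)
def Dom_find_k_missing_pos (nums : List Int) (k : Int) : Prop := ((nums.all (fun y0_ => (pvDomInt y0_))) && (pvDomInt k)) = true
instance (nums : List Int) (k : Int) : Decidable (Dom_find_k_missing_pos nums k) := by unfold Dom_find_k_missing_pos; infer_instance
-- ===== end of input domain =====

-- B replaces A's in-place cyclic sort + greater_positives set by one hash set of the
-- input and a straight scan of candidates 1,2,3,…; A mutates nums in place, B does not
-- (the equivalence proved here is about the return value only).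

-- ===== PORT A =====

-- number of positions whose entry is not the 1-based index (termination measure of A's cyclic sort)
def pvMis (l : List Int) : Nat :=
  ((Finset.range l.length).filter (fun p => l.getD p 0 ≠ (p : Int) + 1)).card

-- entries of the double-set that A's swap performs (cited by pvMis_swap_lt and the invariant proof)
lemma pvGetSwap (l : List Int) (i j : Nat) (hi : i < l.length) (hj : j < l.length) (p : Nat) :
    ((l.set i (l.getD j 0)).set j (l.getD i 0)).getD p 0 =
      if p = j then l.getD i 0 else if p = i then l.getD j 0 else l.getD p 0 := by
  by_cases h1 : p = j
  · subst h1
    rw [if_pos rfl, List.getD_eq_getElem?_getD, List.getElem?_set_self]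
    · rfl
    · simpa using hj
  · rw [if_neg h1, List.getD_eq_getElem?_getD, List.getElem?_set_ne (fun h => h1 h.symm)]
    by_cases h2 : p = i
    · subst h2
      rw [if_pos rfl, List.getElem?_set_self hi]
      rfl
    · rw [if_neg h2, List.getElem?_set_ne (fun h => h2 h.symm), ← List.getD_eq_getElem?_getD]

-- a swap that places value j+1 at position j strictly decreases pvMis (cited by decreasing_by)
lemma pvMis_swap_lt (l : List Int) (i j : Nat) (hi : i < l.length) (hj : j < l.length)
    (hne : i ≠ j) (hiv : l.getD i 0 = (j : Int) + 1) (hjv : l.getD j 0 ≠ (j : Int) + 1) :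
    pvMis ((l.set i (l.getD j 0)).set j (l.getD i 0)) < pvMis l := by
  have hget := pvGetSwap l i j hi hj
  unfold pvMis
  rw [List.length_set, List.length_set]
  apply Finset.card_lt_card
  constructor
  · intro p hp
    simp only [Finset.mem_filter, Finset.mem_range] at hp ⊢
    refine ⟨hp.1, ?_⟩
    have hpred := hp.2
    rw [hget] at hpred
    by_cases h1 : p = j
    · rw [if_pos h1, hiv, h1] at hpred
      exact absurd rfl hpred
    · rw [if_neg h1] at hpred
      by_cases h2 : p = i
      · subst h2
        rw [hiv]
        intro hc
        have : (j : Int) = (p : Int) := by omega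
        exact hne (by exact_mod_cast this.symm)
      · rwa [if_neg h2] at hpred
  · intro hsub
    have hjin : j ∈ (Finset.range l.length).filter (fun p => l.getD p 0 ≠ (p : Int) + 1) := by
      simp only [Finset.mem_filter, Finset.mem_range]
      exact ⟨hj, hjv⟩
    have hjin' := hsub hjin
    simp only [Finset.mem_filter, Finset.mem_range] at hjin'
    have := hjin'.2
    rw [hget, if_pos rfl] at this
    exact this hiv

-- the swap branch's decrease, phrased on the branch conditions (cited by decreasing_by)
lemma pvMis_swap_lt' (l : List Int) (i : Nat) (hlt : i < l.length)
    (h1 : ¬ (l.length : Int) < l.getD i 0) (h2 : ¬ l.getD i 0 < 1)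
    (h3 : ¬ l.getD (l.getD i 0 - 1).toNat 0 = l.getD i 0) :
    pvMis ((l.set i (l.getD (l.getD i 0 - 1).toNat 0)).set (l.getD i 0 - 1).toNat (l.getD i 0))
      < pvMis l := by
  have hj : ((l.getD i 0) - 1).toNat < l.length := by omega
  have hiv : l.getD i 0 = (((l.getD i 0) - 1).toNat : Int) + 1 := by omega
  have hne : i ≠ ((l.getD i 0) - 1).toNat := by
    intro he
    exact h3 (by rw [← he])
  exact pvMis_swap_lt l i _ hlt hj hne hiv (by rw [← hiv]; exact h3)

-- A's first while loop: cyclic sort accumulating greater_positives.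
-- indices are guarded in range in Python, so List.getD is exact here.
def pvSortLoop (l : List Int) (i : Nat) (gp : PySem.Set Int) : List Int × PySem.Set Int :=
  if hlt : i < l.length then
    if (l.length : Int) < l.getD i 0 then
      pvSortLoop l (i + 1) (PySem.Set.add gp (l.getD i 0))
    else if l.getD i 0 < 1 then
      pvSortLoop l (i + 1) gp
    else if l.getD (l.getD i 0 - 1).toNat 0 = l.getD i 0 then
      pvSortLoop l (i + 1) gp
    else
      pvSortLoop ((l.set i (l.getD (l.getD i 0 - 1).toNat 0)).set (l.getD i 0 - 1).toNat (l.getD i 0)) i gp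
  else (l, gp)
termination_by (pvMis l, l.length - i)
decreasing_by
  · exact Prod.Lex.right _ (Nat.sub_succ_lt_self _ _ hlt)
  · exact Prod.Lex.right _ (Nat.sub_succ_lt_self _ _ hlt)
  · exact Prod.Lex.right _ (Nat.sub_succ_lt_self _ _ hlt)
  · rename_i h1 h2 h3
    exact Prod.Lex.left _ _ (pvMis_swap_lt' l i hlt h1 h2 h3)

-- largest toNat of an element (termination bound for the result-building loops)
def pvMaxNat (s : List Int) : Nat := s.foldr (fun v a => max v.toNat a) 0

lemma le_pvMaxNat (s : List Int) (v : Int) (h : v ∈ s) : v.toNat ≤ pvMaxNat s := by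
  induction s with
  | nil => cases h
  | cons a t ih =>
    rcases List.mem_cons.mp h with rfl | h'
    · simp [pvMaxNat]
    · have := ih h'
      simp only [pvMaxNat, List.foldr_cons] at this ⊢
      omega

-- the result-count fuel (k - len) drops when an element is appended (cited by decreasing_by)
lemma pvTailFuel (k : Int) (n : Nat) (h : (n : Int) < k) :
    (k - ((n + 1 : Nat) : Int)).toNat < (k - (n : Int)).toNat :=
  (Int.toNat_lt_toNat (by omega)).mpr (by push_cast; omega)

lemma succ_le_pvMaxNat (s : List Int) (i : Nat) (h : ((i : Int) + 1) ∈ s) :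
    i + 1 ≤ pvMaxNat s := by
  have := le_pvMaxNat s _ h
  omega

lemma pvAltFuel (s : List Int) (i : Int) (h : i ∈ s) :
    ((pvMaxNat s : Int) + 1 - (i + 1)).toNat < ((pvMaxNat s : Int) + 1 - i).toNat :=
  (Int.toNat_lt_toNat (by have := le_pvMaxNat s i h; omega)).mpr (by omega)

-- A's second while loop
def pvResLoop (l : List Int) (gp : PySem.Set Int) (k : Int) (results : List Int) (i : Nat) : List Int :=
  if (results.length : Int) < k then
    if i < l.length ∧ l.getD i 0 - 1 = (i : Int) then
      pvResLoop l gp k results (i + 1)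
    else
      pvResLoop l gp k (if ((i : Int) + 1) ∉ gp then results ++ [(i : Int) + 1] else results) (i + 1)
  else results
termination_by ((k - (results.length : Int)).toNat, max l.length (pvMaxNat gp) + 1 - i)
decreasing_by
  · rename_i hk hplace
    exact Prod.Lex.right _ (Nat.sub_succ_lt_self _ _
      (Nat.lt_succ_of_lt (Nat.lt_of_lt_of_le hplace.1 (Nat.le_max_left _ _))))
  · rename_i hk _hplace
    by_cases hmem : ((i : Int) + 1) ∈ gp
    · rw [dif_neg (not_not_intro hmem)]
      exact Prod.Lex.right _ (Nat.sub_succ_lt_self _ _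
        (Nat.lt_succ_of_lt (Nat.lt_of_lt_of_le
          (Nat.lt_of_lt_of_le (Nat.lt_succ_self i) (succ_le_pvMaxNat gp i hmem))
          (Nat.le_max_right _ _))))
    · rw [dif_pos hmem]
      rw [show (results ++ [(i : Int) + 1]).length = results.length + 1 from by
        rw [List.length_append, List.length_cons, List.length_nil]]
      exact Prod.Lex.left _ _ (pvTailFuel k results.length hk)

def find_k_missing_pos (nums : List Int) (k : Int) : List Int :=
  let r := pvSortLoop nums 0 PySem.Set.empty
  pvResLoop r.1 r.2 k [] 0

-- ===== PORT B =====

-- B's while loop: scan candidates i = 1, 2, 3, … collecting the ones absent from the set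
def pvAltLoop (present : PySem.Set Int) (k : Int) (results : List Int) (i : Int) : List Int :=
  if (results.length : Int) < k then
    pvAltLoop present k (if i ∉ present then results ++ [i] else results) (i + 1)
  else results
termination_by ((k - (results.length : Int)).toNat, ((pvMaxNat present : Int) + 1 - i).toNat)
decreasing_by
  · rename_i hk
    by_cases hmem : i ∈ present
    · rw [dif_neg (not_not_intro hmem)]
      exact Prod.Lex.right _ (pvAltFuel present i hmem)
    · rw [dif_pos hmem]
      rw [show (results ++ [i]).length = results.length + 1 from by
        rw [List.length_append, List.length_cons, List.length_nil]]
      exact Prod.Lex.left _ _ (pvTailFuel k results.length hk)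

def find_k_missing_pos_alt (nums : List Int) (k : Int) : List Int :=
  pvAltLoop (PySem.Set.ofList nums) k [] 1

-- ===== PRECONDITION & SPEC =====
def Spec_find_k_missing_pos (nums : List Int) (k : Int) (out : List Int) : Prop := out = find_k_missing_pos_alt nums k
instance (nums : List Int) (k : Int) (out : List Int) : Decidable (Spec_find_k_missing_pos nums k out) := by unfold Spec_find_k_missing_pos; infer_instance

-- ===== CLAIM (what is proved, stated in full; the proofs are below) =====
def Claim_equal_find_k_missing_pos : Prop := ∀ (nums : List Int) (k : Int), Dom_find_k_missing_pos nums k → Spec_find_k_missing_pos nums k (find_k_missing_pos nums k)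

-- ===== LEMMAS AND PROOFS =====

-- a value v is fully processed by A's first loop: negative, large-and-recorded, or at its home slot
def pvHandled (nums l gp : List Int) (v : Int) : Prop :=
  v < 1 ∨ ((nums.length : Int) < v ∧ v ∈ gp)
    ∨ (1 ≤ v ∧ v ≤ (nums.length : Int) ∧ l.getD (v - 1).toNat 0 = v)

lemma pvCountSet (l : List Int) : ∀ (i : Nat), i < l.length → ∀ (a x : Int),
    (l.set i a).count x + (if l.getD i 0 = x then 1 else 0)
      = l.count x + (if a = x then 1 else 0) := by
  induction l with
  | nil => intro i h; simp at h
  | cons b t ih =>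
    intro i hi a x
    cases i with
    | zero =>
      simp only [List.set, List.count_cons, List.getD_cons_zero]
      split_ifs <;> simp_all
    | succ n =>
      have := ih n (by simpa using hi) a x
      simp only [List.set, List.count_cons, List.getD_cons_succ]
      split_ifs at this ⊢ <;> simp_all

lemma pvSwapPerm (l : List Int) (i j : Nat) (hi : i < l.length) (hj : j < l.length) (hne : i ≠ j) :
    ((l.set i (l.getD j 0)).set j (l.getD i 0)).Perm l := by
  rw [List.perm_iff_count]
  intro x
  have h1 := pvCountSet l i hi (l.getD j 0) x
  have h2 := pvCountSet (l.set i (l.getD j 0)) j (by simpa using hj) (l.getD i 0) x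
  have h3 : (l.set i (l.getD j 0)).getD j 0 = l.getD j 0 := by
    rw [List.getD_eq_getElem?_getD, List.getElem?_set_ne hne, ← List.getD_eq_getElem?_getD]
  rw [h3] at h2
  split_ifs at h1 h2 <;> omega

-- invariant of A's cyclic-sort loop: the list stays a permutation of nums, gp holds only
-- large members of nums, and every position left behind holds a fully processed value
theorem pvSortLoop_inv (nums : List Int) : ∀ (l : List Int) (i : Nat) (gp : PySem.Set Int),
    l.Perm nums →
    (∀ v ∈ gp, (nums.length : Int) < v ∧ v ∈ nums) →
    (∀ p, p < i → pvHandled nums l gp (l.getD p 0)) →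
    (pvSortLoop l i gp).1.Perm nums ∧
    (∀ v ∈ (pvSortLoop l i gp).2, (nums.length : Int) < v ∧ v ∈ nums) ∧
    (∀ p, p < nums.length →
      pvHandled nums (pvSortLoop l i gp).1 (pvSortLoop l i gp).2 ((pvSortLoop l i gp).1.getD p 0)) := by
  intro l i gp
  fun_induction pvSortLoop l i gp with
  | case1 l i gp hlt hgt ih =>
    intro hperm hgp hhand
    have hlen : l.length = nums.length := hperm.length_eq
    have hmem : l.getD i 0 ∈ nums := by
      rw [List.getD_eq_getElem l 0 hlt]
      exact hperm.subset (List.getElem_mem hlt)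
    apply ih hperm
    · intro v hv
      rcases (PySem.Set.mem_add _ _ _).mp hv with hv' | rfl
      · exact hgp v hv'
      · exact ⟨by omega, hmem⟩
    · intro p hp
      rcases Nat.lt_succ_iff_lt_or_eq.mp hp with hp' | rfl
      · rcases hhand p hp' with h | ⟨h1, h2⟩ | h
        · exact Or.inl h
        · exact Or.inr (Or.inl ⟨h1, (PySem.Set.mem_add _ _ _).mpr (Or.inl h2)⟩)
        · exact Or.inr (Or.inr h)
      · exact Or.inr (Or.inl ⟨by omega, (PySem.Set.mem_add _ _ _).mpr (Or.inr rfl)⟩)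
  | case2 l i gp hlt hgt hv1 ih =>
    intro hperm hgp hhand
    apply ih hperm hgp
    intro p hp
    rcases Nat.lt_succ_iff_lt_or_eq.mp hp with hp' | rfl
    · exact hhand p hp'
    · exact Or.inl (by omega)
  | case3 l i gp hlt hgt hv1 hdup ih =>
    intro hperm hgp hhand
    have hlen : l.length = nums.length := hperm.length_eq
    apply ih hperm hgp
    intro p hp
    rcases Nat.lt_succ_iff_lt_or_eq.mp hp with hp' | rfl
    · exact hhand p hp'
    · exact Or.inr (Or.inr ⟨by omega, by omega, hdup⟩)
  | case4 l i gp hlt hgt hv1 hdup ih =>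
    intro hperm hgp hhand
    have hlen : l.length = nums.length := hperm.length_eq
    have hvn : l.getD i 0 ≤ (l.length : Int) := by omega
    have hv1' : (1 : Int) ≤ l.getD i 0 := by omega
    have hj : ((l.getD i 0) - 1).toNat < l.length := by omega
    have hne : i ≠ ((l.getD i 0) - 1).toNat := by
      intro he
      exact hdup (by rw [← he])
    have hget := pvGetSwap l i ((l.getD i 0) - 1).toNat hlt hj
    apply ih ((pvSwapPerm l i _ hlt hj hne).trans hperm) hgp
    intro p hp
    rw [hget p]
    by_cases hpj : p = ((l.getD i 0) - 1).toNat
    · rw [if_pos hpj]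
      refine Or.inr (Or.inr ⟨hv1', by omega, ?_⟩)
      rw [hget ((l.getD i 0 - 1).toNat), if_pos rfl]
    · rw [if_neg hpj, if_neg (by omega : ¬ p = i)]
      rcases hhand p (by omega) with h | h | ⟨h1, h2, h3⟩
      · exact Or.inl h
      · exact Or.inr (Or.inl h)
      · refine Or.inr (Or.inr ⟨h1, h2, ?_⟩)
        have hq1 : ((l.getD p 0 - 1).toNat) ≠ ((l.getD i 0 - 1).toNat) := by
          intro he
          have hw : l.getD p 0 = l.getD i 0 := by omega
          rw [hw] at h3
          exact hdup h3
        have hq2 : ((l.getD p 0 - 1).toNat) ≠ i := by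
          intro he
          have hvw : l.getD i 0 = l.getD p 0 := by rw [← h3, he]
          exact hne (by omega)
        rw [hget ((l.getD p 0 - 1).toNat), if_neg hq1, if_neg hq2]
        exact h3
  | case5 l i gp hlt =>
    intro hperm hgp hhand
    have hlen : l.length = nums.length := hperm.length_eq
    exact ⟨hperm, hgp, fun p hp => hhand p (by omega)⟩

-- A's second loop equals B's loop: position i of the sorted list decides membership of i+1
theorem pvLoops_agree (nums l : List Int) (gp : PySem.Set Int) (k : Int)
    (hlen : l.length = nums.length)
    (K1 : ∀ x : Int, 1 ≤ x → x ≤ (nums.length : Int) → (l.getD (x - 1).toNat 0 = x ↔ x ∈ nums))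
    (K2 : ∀ x : Int, x ∈ gp ↔ ((nums.length : Int) < x ∧ x ∈ nums)) :
    ∀ (results : List Int) (i : Nat),
    pvResLoop l gp k results i = pvAltLoop (PySem.Set.ofList nums) k results ((i : Int) + 1) := by
  intro results i
  fun_induction pvResLoop l gp k results i with
  | case1 results i hk hp ih =>
    have hx : ((i : Int) + 1) ∈ nums := by
      have hp2 := hp.2
      have hp1 := hp.1
      rw [← K1 ((i : Int) + 1) (by omega) (by omega)]
      simp only [add_sub_cancel_right, Int.toNat_natCast]
      omega
    rw [ih]
    conv_rhs => rw [pvAltLoop]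
    rw [if_pos hk, if_neg (not_not_intro (by simpa [PySem.Set.mem_ofList] using hx))]
    congr 1
  | case2 results i hk hnp ih =>
    have hiff : (((i : Int) + 1) ∈ gp) ↔ (((i : Int) + 1) ∈ PySem.Set.ofList nums) := by
      rw [PySem.Set.mem_ofList, K2]
      constructor
      · exact fun h => h.2
      · intro hmemnums
        by_cases hil : i < l.length
        · exfalso
          have hne : l.getD i 0 - 1 ≠ (i : Int) := fun he => hnp ⟨hil, he⟩
          have := (K1 ((i : Int) + 1) (by omega) (by omega)).mpr hmemnums
          simp only [add_sub_cancel_right, Int.toNat_natCast] at this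
          omega
        · exact ⟨by omega, hmemnums⟩
    simp only [dite_eq_ite] at ih
    rw [ih]
    conv_rhs => rw [pvAltLoop]
    rw [if_pos hk]
    have harg : (if ((i : Int) + 1) ∉ gp then results ++ [(i : Int) + 1] else results)
        = (if ((i : Int) + 1) ∉ PySem.Set.ofList nums then results ++ [(i : Int) + 1] else results) := by
      by_cases hm : ((i : Int) + 1) ∈ gp
      · rw [if_neg (not_not_intro hm), if_neg (not_not_intro (hiff.mp hm))]
      · rw [if_pos hm, if_pos (fun h => hm (hiff.mpr h))]
    rw [← harg]
    congr 1
  | case3 results i hk =>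
    conv_rhs => rw [pvAltLoop]
    rw [if_neg hk]

-- ===== VERDICT (by name: the statement is the Claim_ definition above) =====
theorem find_k_missing_pos_spec : Claim_equal_find_k_missing_pos := by
  unfold Claim_equal_find_k_missing_pos
  intro nums k _
  unfold Spec_find_k_missing_pos
  simp only [find_k_missing_pos, find_k_missing_pos_alt]
  obtain ⟨hP, hGP, hH⟩ := pvSortLoop_inv nums nums 0 PySem.Set.empty (List.Perm.refl _)
    (by intro v hv; cases hv) (by intro p hp; omega)
  have hlen : (pvSortLoop nums 0 PySem.Set.empty).1.length = nums.length := hP.length_eq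
  have K1 : ∀ x : Int, 1 ≤ x → x ≤ (nums.length : Int) →
      ((pvSortLoop nums 0 PySem.Set.empty).1.getD (x - 1).toNat 0 = x ↔ x ∈ nums) := by
    intro x h1 h2
    constructor
    · intro hg
      have hidx : (x - 1).toNat < (pvSortLoop nums 0 PySem.Set.empty).1.length := by omega
      have hm : (pvSortLoop nums 0 PySem.Set.empty).1.getD (x - 1).toNat 0
          ∈ (pvSortLoop nums 0 PySem.Set.empty).1 := by
        rw [List.getD_eq_getElem _ _ hidx]
        exact List.getElem_mem hidx
      rw [hg] at hm
      exact hP.subset hm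
    · intro hx
      obtain ⟨p, hp, hpe⟩ := List.mem_iff_getElem.mp ((hP.mem_iff).mpr hx)
      have hgd : (pvSortLoop nums 0 PySem.Set.empty).1.getD p 0 = x := by
        rw [List.getD_eq_getElem _ _ hp]
        exact hpe
      have hh := hH p (by omega)
      rw [hgd] at hh
      rcases hh with h | h | ⟨_, _, h3⟩
      · omega
      · omega
      · exact h3
  have K2 : ∀ x : Int, x ∈ (pvSortLoop nums 0 PySem.Set.empty).2 ↔
      ((nums.length : Int) < x ∧ x ∈ nums) := by
    intro x
    constructor
    · exact hGP x
    · rintro ⟨hgt, hx⟩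
      obtain ⟨p, hp, hpe⟩ := List.mem_iff_getElem.mp ((hP.mem_iff).mpr hx)
      have hgd : (pvSortLoop nums 0 PySem.Set.empty).1.getD p 0 = x := by
        rw [List.getD_eq_getElem _ _ hp]
        exact hpe
      have hh := hH p (by omega)
      rw [hgd] at hh
      have hn : (0 : Int) ≤ (nums.length : Int) := by positivity
      rcases hh with h | ⟨_, h2⟩ | ⟨_, h2, _⟩
      · omega
      · exact h2
      · omega
  have := pvLoops_agree nums (pvSortLoop nums 0 PySem.Set.empty).1
    (pvSortLoop nums 0 PySem.Set.empty).2 k hlen K1 K2 [] 0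
  simpa using this
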